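/- GENERATED by tools/from_farm_form.py from farm/worked/ldexp/Proof.lean (a worked proof of the farm's unit `ldexp`,
   accepted by the verdict) — do not edit. -/
import ProgX.Base.Spec.Units.ldexp
import ProgX.Base.Spec.Proved.ldexp_Lemmas

open X86 X86.User Asan ProgX.Base

set_option maxRecDepth 4000
set_option maxHeartbeats 4000000

/-- `ldexp` satisfies its contract: the prologue and the two signed tests of `n` are walked here; the three segments after a
call of `two_to` (cut1, cut2, and 0x1022a4 where every path joins before the last call) are the lemmas `high_tail_w`, `low_tail_w`,
`last_call_w` of Lemmas.lean, over the facts `Body_w` of a state inside the frame. -/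
theorem ProgX.Base.Spec.Proved.ldexp_ok : ProgX.Base.Spec.ldexp.Statement := by
  intro Lay hLay μ hμ u₀ hcode h_two_to others frames u ret he hpre
  have he' := he
  v_entry he
  have hpre' : ShadowPre others frames u := hpre
  have hsp := hpre'.rsp
  have htt := h_two_to others frames
  u_walk hcode [hμ.vendor] until [ProgX.Base.Spec.Proved.ldexp.join_w] span [ProgX.Base.L.textLo, ProgX.Base.L.textHi] side (v_side)
  · -- call_inv (0x102264): DF and the MXCSR masks at the entry of `two_to`
    v_inv
  · -- the precondition of `two_to(-1022)`: the shadow layer, the clean stack ending 16 bytes lower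
    have hun : ShadowUntouched u.mem s_102264.mem := by v_untouched
    refine ⟨?_, hpre'.offText⟩
    refine (hpre'.inv.untouched hun).lower ?_ ?_ ?_
    · rw [w_rsp]
      u_omega
    · rw [w_rsp]
      u_omega
    · rw [w_rsp]
      u_omega
  · -- call_inv (0x102219)
    v_inv
  · -- the precondition of `two_to(1023)`
    have hun : ShadowUntouched u.mem s_102219.mem := by v_untouched
    refine ⟨?_, hpre'.offText⟩
    refine (hpre'.inv.untouched hun).lower ?_ ?_ ?_
    · rw [w_rsp]
      u_omega
    · rw [w_rsp]
      u_omega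
    · rw [w_rsp]
      u_omega
  · -- 0x1022a4, libm.c:45: -1022 ≤ n ≤ 1023, straight to the last call
    have hsame : Mem.SameExcept [⟨(u.reg .rsp).toNat - 24, (u.reg .rsp).toNat⟩] u.mem s_10225d.mem := by u_same
    have hun : ShadowUntouched u.mem s_10225d.mem := by v_untouched
    have hs1 : UInt64.ofNat (s_10225d.mem.readLE (u.reg .rsp - 8) 8) = u.reg .rbx := by u_resolve
    have hs0 : UInt64.ofNat (s_10225d.mem.readLE (u.reg .rsp) 8) = ret := by u_resolve
    have hdf : s_10225d.flags .df = false := by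
      rw [w_flags]
      simp only [X86.User.df_setStatus]
      exact he_df
    have hmx : s_10225d.mxcsr &&& 0x1F80 = 0x1F80 := by
      rw [w_mxcsr]
      exact he_mx
    exact ProgX.Base.Spec.Proved.ldexp.last_call_w hLay hμ hcode htt he' hpre' w_rip
      ⟨w_rsp, w_kept.mono_all (by rfl), hsame, hun, hs1, hs0, w_eq, hdf, hmx⟩
  · -- 0x102269 (cut2), libm.c:35: n < -1022, after the return of `two_to(-1022)`
    have hsameE : Mem.SameExcept [⟨(u.reg .rsp).toNat - 24, (u.reg .rsp).toNat⟩] u.mem s_102264.mem := by u_same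
    have hunE : ShadowUntouched u.mem s_102264.mem := by v_untouched
    have hs1E : UInt64.ofNat (s_102264.mem.readLE (u.reg .rsp - 8) 8) = u.reg .rbx := by u_resolve
    have hs0E : UInt64.ofNat (s_102264.mem.readLE (u.reg .rsp) 8) = ret := by u_resolve
    exact ProgX.Base.Spec.Proved.ldexp.low_tail_w hLay hμ hcode htt he' hpre' w_rip
      (ProgX.Base.Spec.Proved.ldexp.Body_w.of_return he_room he_top w_rsp_102264 hsameE hunE hs1E hs0E w_rsp (w_kept.mono_all (by rfl))
        w_same w_code w_inv w_post)
  · -- 0x10221e (cut1), libm.c:25: n > 1023, after the return of `two_to(1023)`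
    have hsameE : Mem.SameExcept [⟨(u.reg .rsp).toNat - 24, (u.reg .rsp).toNat⟩] u.mem s_102219.mem := by u_same
    have hunE : ShadowUntouched u.mem s_102219.mem := by v_untouched
    have hs1E : UInt64.ofNat (s_102219.mem.readLE (u.reg .rsp - 8) 8) = u.reg .rbx := by u_resolve
    have hs0E : UInt64.ofNat (s_102219.mem.readLE (u.reg .rsp) 8) = ret := by u_resolve
    exact ProgX.Base.Spec.Proved.ldexp.high_tail_w hLay hμ hcode htt he' hpre' w_rip
      (ProgX.Base.Spec.Proved.ldexp.Body_w.of_return he_room he_top w_rsp_102219 hsameE hunE hs1E hs0E w_rsp (w_kept.mono_all (by rfl))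
        w_same w_code w_inv w_post)
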